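-- pv_equiv track=rewrite | github.com/pbberlin/ecb-monitor-website | vector-envelope.py | normalizeForTokens
-- ===== SOURCE A (Python) =====
-- def normalizeForTokens(pathD: str) -> list[str]:
--     cmdSet = set("MmLlHhVvZz")
--     outChars = []
--     i = 0
--     while i < len(pathD):
--         ch = pathD[i]
--         if ch in cmdSet:
--             outChars.append(" ")
--             outChars.append(ch.upper())
--             outChars.append(" ")
--             i = i + 1
--         elif ch == ",":
--             outChars.append(" ")
--             i = i + 1
--         elif ch == "-":
--             if i > 0:
--                 prev = pathD[i - 1]
--                 if prev not in " ,\t\r\nEe-+":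
--                     outChars.append(" ")
--             outChars.append("-")
--             i = i + 1
--         else:
--             outChars.append(ch)
--             i = i + 1
--     return "".join(outChars).split()
-- ===== SOURCE B (Python) =====
-- def normalizeForTokens(pathD: str) -> list[str]:
--     # Staged passes: split on '-' and rejoin with a space inserted before each
--     # minus that follows a number-context character, then expand command
--     # letters / commas through a single translation table, then whitespace-split.
--     parts = pathD.split("-")
--     s = parts[0]
--     for p in parts[1:]:
--         s += ("-" if (not s or s[-1] in " ,\t\r\nEe-+") else " -") + p
--     table = {ord(c): " " + c.upper() + " " for c in "MmLlHhVvZz"}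
--     table[ord(",")] = " "
--     return s.translate(table).split()
-- ===== Notes on version B (the rewrite author's own statement) =====
-- stated objective: alternative
-- what changed: Replaces A's per-character index loop (with pathD[i-1] lookback and a char-appended list) by three staged whole-string passes: split on the minus character and rejoin with the context-dependent separator, then expand command letters and commas through a str.translate table, then whitespace-split.
import Mathlib
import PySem

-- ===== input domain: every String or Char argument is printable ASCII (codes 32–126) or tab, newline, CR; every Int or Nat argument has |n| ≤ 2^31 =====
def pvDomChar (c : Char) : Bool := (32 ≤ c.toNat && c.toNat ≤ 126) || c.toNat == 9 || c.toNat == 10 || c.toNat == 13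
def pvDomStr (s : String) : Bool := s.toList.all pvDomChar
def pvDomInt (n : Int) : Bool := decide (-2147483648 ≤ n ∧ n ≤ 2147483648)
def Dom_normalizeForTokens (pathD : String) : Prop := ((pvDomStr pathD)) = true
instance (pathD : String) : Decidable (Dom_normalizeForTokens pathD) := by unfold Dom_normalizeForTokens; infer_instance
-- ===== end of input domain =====

-- B replaces A's per-character index loop by staged whole-string passes:
-- split on '-' and rejoin with the context rule, then a translation table,
-- then whitespace split (objective: alternative).

-- ===== PORT A =====
-- A's index loop: builds the output characters front to back, i advancing by 1.
def pvLoopA (cs : List Char) (i : Nat) : List Char :=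
  if h : i < cs.length then
    let ch := cs[i]
    if ch ∈ "MmLlHhVvZz".toList then
      ' ' :: PySem.Chars.upperChar ch :: ' ' :: pvLoopA cs (i + 1)
    else if ch = ',' then
      ' ' :: pvLoopA cs (i + 1)
    else if ch = '-' then
      (if hi : 0 < i then
        (if cs[i - 1]'(by omega) ∈ " ,\t\r\nEe-+".toList then ['-'] else [' ', '-'])
       else ['-']) ++ pvLoopA cs (i + 1)
    else
      ch :: pvLoopA cs (i + 1)
  else []
termination_by cs.length - i

def normalizeForTokens (pathD : String) : List String :=
  PySem.Str.split₀ (String.ofList (pvLoopA pathD.toList 0))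

-- ===== PORT B =====
-- the separator Source B chooses when rejoining: a bare '-' after number-context
-- characters are absent, else ' -'; s[-1] is the accumulator's last char.
def pvSep (s : List Char) : List Char :=
  match s.getLast? with
  | none => ['-']
  | some c => if c ∈ " ,\t\r\nEe-+".toList then ['-'] else [' ', '-']

-- one entry of Source B's translation table (identity off the table's keys)
def pvTrans (c : Char) : List Char :=
  if c ∈ "MmLlHhVvZz".toList then [' ', PySem.Chars.upperChar c, ' ']
  else if c = ',' then [' ']
  else [c]

def normalizeForTokens_alt (pathD : String) : List String :=
  let parts := pathD.toList.splitOn '-'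
  let s := match parts with
           | [] => []                                    -- unreachable: split never returns []
           | p0 :: ps => ps.foldl (fun s p => s ++ pvSep s ++ p) p0
  PySem.Str.split₀ (String.ofList (s.flatMap pvTrans))

-- ===== PRECONDITION & SPEC =====
def Spec_normalizeForTokens (pathD : String) (out : List String) : Prop := out = normalizeForTokens_alt pathD
instance (pathD : String) (out : List String) : Decidable (Spec_normalizeForTokens pathD out) := by unfold Spec_normalizeForTokens; infer_instance

-- ===== CLAIM (what is proved, stated in full; the proofs are below) =====
def Claim_equal_normalizeForTokens : Prop := ∀ (pathD : String), Dom_normalizeForTokens pathD → Spec_normalizeForTokens pathD (normalizeForTokens pathD)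

-- ===== LEMMAS AND PROOFS =====

-- A's expansion of one character given its predecessor (none for the first).
def pvExpand (prev : Option Char) (ch : Char) : List Char :=
  if ch ∈ "MmLlHhVvZz".toList then [' ', PySem.Chars.upperChar ch, ' ']
  else if ch = ',' then [' ']
  else if ch = '-' then
    match prev with
    | none => ['-']
    | some p => if p ∈ " ,\t\r\nEe-+".toList then ['-'] else [' ', '-']
  else [ch]

-- A's stream written as a predecessor-carrying recursion.
def pvGenA : Option Char → List Char → List Char
  | _, [] => []
  | prev, c :: t => pvExpand prev c ++ pvGenA (some c) t

-- Source B's first pass (space insertion before '-') written as the same recursion.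
def pvIns : Option Char → List Char → List Char
  | _, [] => []
  | prev, c :: t =>
      (if c = '-' then
        (match prev with
         | none => ['-']
         | some p => if p ∈ " ,\t\r\nEe-+".toList then ['-'] else [' ', '-'])
       else [c]) ++ pvIns (some c) t

lemma pvZip_length (cs : List Char) :
    ((none :: cs.map some).zip cs).length = cs.length := by
  simp

lemma pvZip_getElem (cs : List Char) (i : Nat) (h : i < cs.length) :
    ((none :: cs.map some).zip cs)[i]'(by simpa [pvZip_length]) =
      ((if hi : 0 < i then some (cs[i - 1]'(by omega)) else none), cs[i]) := by
  rcases i with _ | j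
  · simp
  · simp [List.getElem_zip]

lemma pvLoopA_eq_flatMap (cs : List Char) :
    ∀ i, pvLoopA cs i =
      (((none :: cs.map some).zip cs).drop i).flatMap (fun pc => pvExpand pc.1 pc.2) := by
  intro i
  by_cases h : i < cs.length
  · induction hn : cs.length - i using Nat.strong_induction_on generalizing i with
    | _ n ih =>
      have hdrop : ((none :: cs.map some).zip cs).drop i =
          ((none :: cs.map some).zip cs)[i]'(by simpa [pvZip_length]) ::
            ((none :: cs.map some).zip cs).drop (i + 1) := by
        exact List.drop_eq_getElem_cons (by simpa [pvZip_length])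
      have htail : pvLoopA cs (i + 1) =
          (((none :: cs.map some).zip cs).drop (i + 1)).flatMap
            (fun pc => pvExpand pc.1 pc.2) := by
        by_cases h' : i + 1 < cs.length
        · exact ih (cs.length - (i + 1)) (by omega) (i + 1) h' rfl
        · have : ((none :: cs.map some).zip cs).drop (i + 1) = [] := by
            apply List.drop_eq_nil_of_le; simp; omega
          rw [this, pvLoopA]
          simp [h']
      rw [pvLoopA, hdrop]
      simp only [h, dif_pos]
      rw [pvZip_getElem cs i h]
      simp only [pvExpand, List.flatMap_cons, htail]
      split_ifs <;> simp_all
  · have hnil : ((none :: cs.map some).zip cs).drop i = [] := by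
      apply List.drop_eq_nil_of_le; simp; omega
    rw [pvLoopA, hnil]
    simp [h]

lemma pvFlatMap_zip_eq_genA (cs : List Char) :
    ∀ p, ((p :: cs.map some).zip cs).flatMap (fun pc => pvExpand pc.1 pc.2) = pvGenA p cs := by
  induction cs with
  | nil => intro p; simp [pvGenA]
  | cons c t ih =>
      intro p
      simp only [List.map_cons, List.zip_cons_cons, List.flatMap_cons, pvGenA]
      rw [ih (some c)]

-- the translation pass turns Source B's first-pass stream into A's stream
lemma pvExpand_dash (p : Option Char) :
    pvExpand p '-' =
      (match p with
       | none => ['-']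
       | some q => if q ∈ " ,\t\r\nEe-+".toList then ['-'] else [' ', '-']) := by
  unfold pvExpand
  rw [if_neg (by decide), if_neg (by decide), if_pos rfl]

lemma pvIns_cons (p : Option Char) (c : Char) (t : List Char) :
    pvIns p (c :: t) =
      (if c = '-' then
        (match p with
         | none => ['-']
         | some q => if q ∈ " ,\t\r\nEe-+".toList then ['-'] else [' ', '-'])
       else [c]) ++ pvIns (some c) t := rfl

lemma pvGenA_eq_trans_ins (cs : List Char) :
    ∀ p, pvGenA p cs = (pvIns p cs).flatMap pvTrans := by
  induction cs with
  | nil => intro p; simp [pvGenA, pvIns]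
  | cons c t ih =>
      intro p
      rw [pvIns_cons]
      simp only [pvGenA, List.flatMap_append, ih (some c)]
      congr 1
      by_cases hc : c = '-'
      · subst hc
        rw [if_pos rfl, pvExpand_dash]
        cases p with
        | none => decide
        | some q =>
            show (if q ∈ " ,\t\r\nEe-+".toList then ['-'] else [' ', '-']) =
              List.flatMap pvTrans
                (if q ∈ " ,\t\r\nEe-+".toList then ['-'] else [' ', '-'])
            split_ifs <;> decide
      · rw [if_neg hc]
        simp only [pvExpand, if_neg hc, pvTrans, List.flatMap_cons, List.flatMap_nil,
          List.append_nil]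

lemma pvSep_none {s : List Char} (h : s.getLast? = none) : pvSep s = ['-'] := by
  unfold pvSep; rw [h]

lemma pvSep_some {s : List Char} {c : Char} (h : s.getLast? = some c) :
    pvSep s = if c ∈ " ,\t\r\nEe-+".toList then ['-'] else [' ', '-'] := by
  unfold pvSep; rw [h]

-- Source B's split-then-rejoin equals the predecessor recursion pvIns
lemma pvRejoin_splitOn (cs : List Char) :
    ∀ acc : List Char,
      (match cs.splitOn '-' with
       | [] => []
       | p0 :: ps => ps.foldl (fun s p => s ++ pvSep s ++ p) (acc ++ p0)) =
        acc ++ pvIns acc.getLast? cs := by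
  induction cs with
  | nil => intro acc; simp [List.splitOn, List.splitOnP_nil, pvIns]
  | cons c t ih =>
      intro acc
      obtain ⟨p0, ps, hps⟩ : ∃ p0 ps, t.splitOn '-' = p0 :: ps := by
        rcases h : t.splitOn '-' with _ | ⟨p0, ps⟩
        · exact absurd h (List.splitOnP_ne_nil _ _)
        · exact ⟨p0, ps, rfl⟩
      by_cases hc : c = '-'
      · subst hc
        have hsp : ('-' :: t).splitOn '-' = [] :: t.splitOn '-' := by
          simp [List.splitOn, List.splitOnP_cons]
        have hlast : (acc ++ pvSep acc).getLast? = some '-' := by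
          cases h : acc.getLast? with
          | none => rw [pvSep_none h]; simp
          | some q => rw [pvSep_some h]; split_ifs <;> simp
        have := ih (acc ++ pvSep acc)
        rw [hps] at this
        rw [hlast] at this
        rw [hsp, hps]
        simp only [List.foldl_cons, List.append_nil]
        have this' : List.foldl (fun s p => s ++ pvSep s ++ p) (acc ++ pvSep acc ++ p0) ps =
            acc ++ pvSep acc ++ pvIns (some '-') t := this
        rw [this', pvIns_cons, if_pos rfl]
        show acc ++ pvSep acc ++ pvIns (some '-') t =
          acc ++ (pvSep acc ++ pvIns (some '-') t)
        simp
      · have hsp : (c :: t).splitOn '-' = (t.splitOn '-').modifyHead (List.cons c) := by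
          simp only [List.splitOn, List.splitOnP_cons]
          rw [if_neg (by simp [hc])]
        rw [hsp, hps]
        simp only [List.modifyHead]
        have := ih (acc ++ [c])
        rw [hps] at this
        rw [show (acc ++ [c]).getLast? = some c by simp] at this
        have this' : List.foldl (fun s p => s ++ pvSep s ++ p) (acc ++ [c] ++ p0) ps =
            acc ++ [c] ++ pvIns (some c) t := this
        rw [show acc ++ c :: p0 = acc ++ [c] ++ p0 by simp, this',
          pvIns_cons, if_neg hc]
        simp

-- ===== VERDICT (by name: the statement is the Claim_ definition above) =====
theorem normalizeForTokens_spec : Claim_equal_normalizeForTokens := by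
  intro pathD _
  show _ = _
  unfold normalizeForTokens normalizeForTokens_alt
  rw [pvLoopA_eq_flatMap pathD.toList 0]
  simp only [List.drop_zero]
  rw [pvFlatMap_zip_eq_genA pathD.toList none, pvGenA_eq_trans_ins pathD.toList none]
  have := pvRejoin_splitOn pathD.toList []
  simp only [List.nil_append, List.getLast?_nil] at this
  rw [← this]
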